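-- pv_equiv track=rewrite | github.com/repyt-margorp/aize | src/kernel/auth.py | auth_context_allows
-- ===== SOURCE A (Python) =====
-- from typing import Any
--
-- ROLE_CAPABILITIES: dict[str, set[str]] = {
--     "root": {"spawn_service", "manage_users", "control_service", "read_service_status", "superuser"},
--     "superuser": {"spawn_service", "manage_users", "control_service", "read_service_status", "superuser"},
--     "user": set(),
--     "system": set(),
-- }
--
-- def auth_context_allows(auth: dict[str, Any] | None, capability: str) -> bool:
--     if not isinstance(auth, dict):
--         return False
--     if capability in set(str(item) for item in auth.get("capabilities", [])):
--         return True
--     roles = {str(item) for item in auth.get("roles", [])}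
--     for role in roles:
--         if capability in ROLE_CAPABILITIES.get(role, set()):
--             return True
--     return False
-- ===== SOURCE B (Python) =====
-- from typing import Any
--
-- ROLE_CAPABILITIES: dict[str, set[str]] = {
--     "root": {"spawn_service", "manage_users", "control_service", "read_service_status", "superuser"},
--     "superuser": {"spawn_service", "manage_users", "control_service", "read_service_status", "superuser"},
--     "user": set(),
--     "system": set(),
-- }
--
-- # Inverted index built once: capability -> set of roles that grant it.
-- _CAP_TO_ROLES: dict[str, set[str]] = {}
-- for _role, _caps in ROLE_CAPABILITIES.items():
--     for _cap in _caps: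
--         _CAP_TO_ROLES.setdefault(_cap, set()).add(_role)
--
-- def auth_context_allows(auth: dict[str, Any] | None, capability: str) -> bool:
--     if not isinstance(auth, dict):
--         return False
--     if any(str(item) == capability for item in auth.get("capabilities", [])):
--         return True
--     granting = _CAP_TO_ROLES.get(capability, set())
--     return any(str(role) in granting for role in auth.get("roles", []))
-- ===== Notes on version B (the rewrite author's own statement) =====
-- stated objective: alternative
-- what changed: B precomputes an inverted index mapping each capability to the set of roles that grant it, then answers with an early-exit any() over the direct capabilities and a single any() scan of the roles against that one precomputed set, instead of A's staged set-build plus per-role ROLE_CAPABILITIES lookups with early return.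
import Mathlib
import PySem

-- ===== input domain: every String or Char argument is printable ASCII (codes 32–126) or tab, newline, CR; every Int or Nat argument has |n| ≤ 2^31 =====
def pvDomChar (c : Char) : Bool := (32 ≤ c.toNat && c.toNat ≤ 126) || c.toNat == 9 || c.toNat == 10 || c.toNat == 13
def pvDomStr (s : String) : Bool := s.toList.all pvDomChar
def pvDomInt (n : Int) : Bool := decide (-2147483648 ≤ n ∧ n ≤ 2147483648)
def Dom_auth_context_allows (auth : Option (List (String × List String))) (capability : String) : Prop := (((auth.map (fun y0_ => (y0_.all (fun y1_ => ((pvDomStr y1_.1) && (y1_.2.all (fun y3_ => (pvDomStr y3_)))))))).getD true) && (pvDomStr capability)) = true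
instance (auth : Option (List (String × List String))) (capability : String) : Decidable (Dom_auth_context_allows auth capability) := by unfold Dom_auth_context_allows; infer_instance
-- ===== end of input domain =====

-- B answers via an inverted index (capability -> roles that grant it) built once from
-- ROLE_CAPABILITIES, plus early-exit any() scans, instead of A's per-role table lookups
-- over a deduplicated role set (objective: alternative).


-- module-level constant shared by both versions
def ROLE_CAPABILITIES : PySem.Dict String (PySem.Set String) :=
  PySem.Dict.ofList
    [ ("root", PySem.Set.ofList ["spawn_service", "manage_users", "control_service", "read_service_status", "superuser"]),
      ("superuser", PySem.Set.ofList ["spawn_service", "manage_users", "control_service", "read_service_status", "superuser"]),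
      ("user", PySem.Set.empty),
      ("system", PySem.Set.empty) ]

-- ===== PORT A =====
-- A's 'for role in roles: if capability in …: return True' early-return loop
def pvLoopA (capability : String) : List String → Bool
  | [] => false
  | r :: rs =>
      if PySem.Set.contains (ROLE_CAPABILITIES.getD r PySem.Set.empty) capability then true
      else pvLoopA capability rs

def auth_context_allows (auth : Option (List (String × List String))) (capability : String) : Bool :=
  match auth with
  | none => false                          -- not isinstance(auth, dict)
  | some d0 =>
      let d := PySem.Dict.mk d0
      -- str(item) on a string is the identity, so the comprehensions drop the str() call
      if PySem.Set.contains (PySem.Set.ofList (d.getD "capabilities" [])) capability then true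
      else pvLoopA capability (PySem.Set.ofList (d.getD "roles" []))

-- ===== PORT B =====
-- B's module-level inverted index _CAP_TO_ROLES: capability -> set of roles granting it,
-- built by the module-load loop 'for role, caps: for cap in caps: setdefault(cap, set()).add(role)'
-- (the inner iteration over a Python set is consumed order-insensitively: the dict is only
-- looked up, and its values only membership-tested)
def CAP_TO_ROLES : PySem.Dict String (PySem.Set String) :=
  ROLE_CAPABILITIES.items.foldl
    (fun acc rc => rc.2.foldl
      (fun acc2 cap => acc2.modify cap PySem.Set.empty (fun s => PySem.Set.add s rc.1)) acc)
    PySem.Dict.empty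

def auth_context_allows_alt (auth : Option (List (String × List String))) (capability : String) : Bool :=
  match auth with
  | none => false
  | some d0 =>
      let d := PySem.Dict.mk d0
      -- any(str(item) == capability for item in …); str() is the identity on strings
      if (d.getD "capabilities" []).any (fun item => item == capability) then true
      else
        let granting := CAP_TO_ROLES.getD capability PySem.Set.empty
        (d.getD "roles" []).any (fun role => PySem.Set.contains granting role)

-- ===== PRECONDITION & SPEC =====
def Spec_auth_context_allows (auth : Option (List (String × List String))) (capability : String) (out : Bool) : Prop := out = auth_context_allows_alt auth capability
instance (auth : Option (List (String × List String))) (capability : String) (out : Bool) : Decidable (Spec_auth_context_allows auth capability out) := by unfold Spec_auth_context_allows; infer_instance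

-- ===== CLAIM (what is proved, stated in full; the proofs are below) =====
def Claim_equal_auth_context_allows : Prop := ∀ (auth : Option (List (String × List String))) (capability : String), Dom_auth_context_allows auth capability → Spec_auth_context_allows auth capability (auth_context_allows auth capability)

-- ===== LEMMAS AND PROOFS =====

-- both module-level dicts evaluated to literals
lemma ctr_eval : CAP_TO_ROLES = PySem.Dict.mk
    [("spawn_service", ["root", "superuser"]), ("manage_users", ["root", "superuser"]),
     ("control_service", ["root", "superuser"]), ("read_service_status", ["root", "superuser"]),
     ("superuser", ["root", "superuser"])] := by rfl

lemma rc_eval : ROLE_CAPABILITIES = PySem.Dict.mk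
    [("root", ["spawn_service", "manage_users", "control_service", "read_service_status", "superuser"]),
     ("superuser", ["spawn_service", "manage_users", "control_service", "read_service_status", "superuser"]),
     ("user", []), ("system", [])] := by rfl

-- the inverted index inverts the table: role grants cap ↔ role ∈ CAP_TO_ROLES[cap]
lemma pvKey (cap role : String) :
    PySem.Set.contains (CAP_TO_ROLES.getD cap PySem.Set.empty) role =
    PySem.Set.contains (ROLE_CAPABILITIES.getD role PySem.Set.empty) cap := by
  rw [ctr_eval, rc_eval]
  simp only [PySem.Dict.getD, PySem.Dict.get?_mk_cons]
  split_ifs <;> simp_all [PySem.Dict.get?] <;> simp_all [@eq_comm String]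

-- A's early-return loop is an existence test over the role list
lemma pvLoopA_eq_true_iff (capability : String) (rs : List String) :
    pvLoopA capability rs = true ↔
      ∃ r ∈ rs, capability ∈ ROLE_CAPABILITIES.getD r PySem.Set.empty := by
  induction rs with
  | nil => simp [pvLoopA]
  | cons r rs ih =>
      by_cases h : capability ∈ ROLE_CAPABILITIES.getD r PySem.Set.empty <;>
        simp [pvLoopA, ih]

-- ===== VERDICT (by name: the statement is the Claim_ definition above) =====
theorem auth_context_allows_spec : Claim_equal_auth_context_allows := by
  intro auth capability _
  unfold Spec_auth_context_allows auth_context_allows auth_context_allows_alt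
  cases auth with
  | none => rfl
  | some d0 =>
      have h1 : PySem.Set.contains (PySem.Set.ofList ((PySem.Dict.mk d0).getD "capabilities" [])) capability
          = ((PySem.Dict.mk d0).getD "capabilities" []).any (fun item => item == capability) := by
        rw [Bool.eq_iff_iff]
        simp only [PySem.Set.contains_iff, PySem.Set.mem_ofList, List.any_eq_true, beq_iff_eq]
        exact ⟨fun h => ⟨capability, h, rfl⟩, fun ⟨x, hx, he⟩ => he ▸ hx⟩
      have h2 : pvLoopA capability (PySem.Set.ofList ((PySem.Dict.mk d0).getD "roles" []))
          = ((PySem.Dict.mk d0).getD "roles" []).any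
              (fun role => PySem.Set.contains (CAP_TO_ROLES.getD capability PySem.Set.empty) role) := by
        rw [Bool.eq_iff_iff]
        simp only [pvLoopA_eq_true_iff, List.any_eq_true, PySem.Set.mem_ofList, pvKey,
          PySem.Set.contains_iff]
      simp only [h1, h2]
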